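-- pv_equiv track=rewrite | github.com/iproha94/contests | codeforces/1215/b.py | f_tl
-- ===== SOURCE A (Python) =====
-- def f_tl(arr):
--     n1 = 0
--     n2 = 0
--
--     left_otr_counts = [0] * len(arr)
--     left_otr_counts[0] = 0 if arr[0] > 0 else 1
--     for i in range(1, len(arr)):
--         left_otr_counts[i] = left_otr_counts[i - 1] + (0 if arr[i] > 0 else 1)
--
--     for i in range(len(arr)):
--         for j in range(i, len(arr)):
--             otr_count = left_otr_counts[j] - left_otr_counts[i] + (0 if arr[i] > 0 else 1)
--             if otr_count % 2:
--                 n1 += 1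
--             else:
--                 n2 += 1
--
--     return f"{n1} {n2}"
-- ===== SOURCE B (Python) =====
-- def f_tl(arr):
--     # prefix-parity counting: O(n) instead of A's O(n^2) pair scan
--     c0, c1 = 1, 0          # counts of prefixes with even / odd number of non-positive elements
--     p = False              # parity of the current prefix
--     for x in arr:
--         if x <= 0:
--             p = not p
--         if p:
--             c1 += 1
--         else:
--             c0 += 1
--     n = len(arr)
--     n1 = c0 * c1
--     n2 = n * (n + 1) // 2 - n1
--     return f"{n1} {n2}"
-- ===== Notes on version B (the rewrite author's own statement) =====
-- stated objective: faster
-- what changed: A builds a prefix array and scans all O(n^2) index pairs classifying each subarray's parity; B makes one O(n) pass counting prefixes with even/odd numbers of non-positive elements and gets both answers from the closed forms n1 = c_even*c_odd and n2 = n(n+1)/2 - n1.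
import Mathlib
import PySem

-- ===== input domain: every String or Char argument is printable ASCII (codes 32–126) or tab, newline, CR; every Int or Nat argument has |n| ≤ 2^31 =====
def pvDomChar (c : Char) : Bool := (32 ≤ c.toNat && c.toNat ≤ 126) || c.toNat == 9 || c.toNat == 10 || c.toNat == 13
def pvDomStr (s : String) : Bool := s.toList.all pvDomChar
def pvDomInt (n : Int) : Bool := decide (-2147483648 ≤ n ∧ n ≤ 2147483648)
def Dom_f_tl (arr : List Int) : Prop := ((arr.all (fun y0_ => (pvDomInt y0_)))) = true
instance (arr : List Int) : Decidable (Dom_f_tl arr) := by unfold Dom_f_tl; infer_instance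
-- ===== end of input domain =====

-- B replaces A's quadratic scan over all subarray pairs by one prefix-parity pass and a closed
-- form (counting pairs of equal/unequal prefix parities); objective: faster (O(n) vs O(n^2)).

-- ===== PORT A =====
-- the prefix array left_otr_counts: [0]*n, assignment at 0, then the range(1, n) loop of index assignments
def f_tlLeft (arr : List Int) : List Int :=
  let L0 : List Int :=
    (List.replicate arr.length (0 : Int)).set 0
      (if PySem.List.pyGetD arr 0 0 > 0 then 0 else 1)
  (PySem.List.pyRange 1 (arr.length : Int)).foldl
    (fun L i =>
      L.set i.toNat (PySem.List.pyGetD L (i - 1) 0 +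
        (if PySem.List.pyGetD arr i 0 > 0 then 0 else 1)))
    L0

def f_tl (arr : List Int) : String :=
  let left := f_tlLeft arr
  let r :=
    (PySem.List.pyRange 0 (arr.length : Int)).foldl
      (fun (p : Int × Int) i =>
        (PySem.List.pyRange i (arr.length : Int)).foldl
          (fun (q : Int × Int) j =>
            if PySem.Int.mod
                 (PySem.List.pyGetD left j 0 - PySem.List.pyGetD left i 0 +
                   (if PySem.List.pyGetD arr i 0 > 0 then 0 else 1)) 2 ≠ 0
            then (q.1 + 1, q.2)
            else (q.1, q.2 + 1))
          p)
      ((0 : Int), (0 : Int))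
  PySem.Int.toStr r.1 ++ " " ++ PySem.Int.toStr r.2

-- ===== PORT B =====
def f_tl_alt (arr : List Int) : String :=
  let s :=
    arr.foldl
      (fun (st : Int × Int × Bool) x =>
        let p := if x ≤ 0 then !st.2.2 else st.2.2
        if p then (st.1, st.2.1 + 1, p) else (st.1 + 1, st.2.1, p))
      (1, 0, false)
  let n : Int := (arr.length : Int)
  let n1 := s.1 * s.2.1
  let n2 := PySem.Int.floordiv (n * (n + 1)) 2 - n1
  PySem.Int.toStr n1 ++ " " ++ PySem.Int.toStr n2

-- ===== PRECONDITION & SPEC =====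
-- Pre_ excludes only the empty list, on which A raises IndexError at its first prefix-array assignment.
def Pre_f_tl (arr : List Int) : Prop := arr ≠ []
instance (arr : List Int) : Decidable (Pre_f_tl arr) := by unfold Pre_f_tl; infer_instance
def pvWitness_f_tl : List Int := [1, -2, 3]

def Spec_f_tl (arr : List Int) (out : String) : Prop := out = f_tl_alt arr
instance (arr : List Int) (out : String) : Decidable (Spec_f_tl arr out) := by unfold Spec_f_tl; infer_instance

-- ===== CLAIM (what is proved, stated in full; the proofs are below) =====
def Claim_equal_f_tl : Prop := ∀ (arr : List Int), Dom_f_tl arr → Pre_f_tl arr → Spec_f_tl arr (f_tl arr)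

-- ===== LEMMAS AND PROOFS =====

def pvInd (x : Int) : Int := if x > 0 then 0 else 1
def pvS (l : List Int) (k : Nat) : Int := ((l.take k).map pvInd).sum
def pvQ (l : List Int) (k : Nat) : Bool := decide (pvS l k % 2 = 1)
theorem pvS_zero (l : List Int) : pvS l 0 = 0 := by simp [pvS]

theorem pvQ_zero (l : List Int) : pvQ l 0 = false := by simp [pvQ, pvS]

def pvDD (Qb : Nat → Bool) (i n : Nat) : Nat :=
  (List.range' i (n - i)).countP (fun j => Qb (j + 1) != Qb i)
def pvEE (Qb : Nat → Bool) (i n : Nat) : Nat :=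
  (List.range' i (n - i)).countP (fun j => !(Qb (j + 1) != Qb i))
def pvTT (Qb : Nat → Bool) (n : Nat) : Nat := ((List.range n).map (fun i => pvDD Qb i n)).sum
def pvCF (Qb : Nat → Bool) (n : Nat) : Nat := (List.range (n + 1)).countP (fun k => Qb k = false)
def pvCT (Qb : Nat → Bool) (n : Nat) : Nat := (List.range (n + 1)).countP (fun k => Qb k = true)

theorem pvS_succ (l : List Int) (k : Nat) (hk : k < l.length) :
    pvS l (k + 1) = pvS l k + pvInd (l.getD k 0) := by
  unfold pvS
  rw [List.take_succ, List.map_append, List.sum_append]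
  simp [List.getElem?_eq_getElem hk, List.getD_eq_getElem l 0 hk]

theorem pvDD_add_pvEE (Qb : Nat → Bool) (i n : Nat) :
    pvDD Qb i n + pvEE Qb i n = n - i := by
  unfold pvDD pvEE
  have h := List.length_eq_countP_add_countP (fun j => Qb (j + 1) != Qb i)
      (l := List.range' i (n - i))
  rw [List.length_range'] at h
  have h2 : List.countP (fun a => decide ¬((Qb (a + 1) != Qb i) = true)) (List.range' i (n - i))
      = List.countP (fun j => !(Qb (j + 1) != Qb i)) (List.range' i (n - i)) := by
    apply List.countP_congr; intro a _; simp
  rw [h2] at h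
  omega

theorem pvGauss (n : Nat) : 2 * ((List.range n).map (fun i => n - i)).sum = n * (n + 1) := by
  induction n with
  | zero => simp
  | succ n ih =>
    rw [List.range_succ_eq_map]
    simp only [List.map_cons, List.map_map, List.sum_cons]
    have h : List.map ((fun i => n + 1 - i) ∘ Nat.succ) (List.range n)
        = List.map (fun i => n - i) (List.range n) :=
      List.map_congr_left (by intro a ha; simp [Function.comp])
    rw [h]
    have e : 2 * ((n + 1 - 0) + (List.map (fun i => n - i) (List.range n)).sum)
        = 2 * ((List.map (fun i => n - i) (List.range n)).sum) + 2 * (n + 1) := by omega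
    rw [e, ih]; ring

theorem pvDD_self (Qb : Nat → Bool) (n : Nat) : pvDD Qb n n = 0 := by
  simp [pvDD]

theorem pvDD_succ (Qb : Nat → Bool) (i n : Nat) (h : i ≤ n) :
    pvDD Qb i (n + 1) = pvDD Qb i n + (if Qb (n + 1) != Qb i then 1 else 0) := by
  unfold pvDD
  have h1 : n + 1 - i = (n - i) + 1 := by omega
  rw [h1, List.range'_1_concat, List.countP_append]
  have h2 : i + (n - i) = n := by omega
  simp [h2, List.countP_singleton]

theorem pvKey (Qb : Nat → Bool) (n : Nat) : pvTT Qb n = pvCF Qb n * pvCT Qb n := by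
  induction n with
  | zero =>
    cases h : Qb 0 <;> simp [pvTT, pvCF, pvCT, List.range_succ, h]
  | succ n ih =>
    have hTT : pvTT Qb (n + 1)
        = pvTT Qb n + (List.range (n + 1)).countP (fun i => Qb (n + 1) != Qb i) := by
      unfold pvTT
      rw [List.range_succ, List.map_append, List.sum_append, List.countP_append]
      have hmap : List.map (fun i => pvDD Qb i (n + 1)) (List.range n)
          = List.map (fun i => pvDD Qb i n + (if Qb (n + 1) != Qb i then 1 else 0)) (List.range n) := by
        apply List.map_congr_left
        intro a ha
        exact pvDD_succ Qb a n (by simp at ha; omega)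
      rw [hmap, List.sum_map_add, PySem.List.sum_map_ite_one_zero_nat]
      have hn : pvDD Qb n (n + 1) = if Qb (n + 1) != Qb n then 1 else 0 := by
        rw [pvDD_succ Qb n n (le_refl n), pvDD_self]; omega
      simp [hn, List.countP_singleton]
      omega
    have hCFs : pvCF Qb (n + 1)
        = pvCF Qb n + (if Qb (n + 1) = false then 1 else 0) := by
      unfold pvCF; rw [List.range_succ, List.countP_append]; simp [List.countP_singleton]
    have hCTs : pvCT Qb (n + 1)
        = pvCT Qb n + (if Qb (n + 1) = true then 1 else 0) := by
      unfold pvCT; rw [List.range_succ, List.countP_append]; simp [List.countP_singleton]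
    cases h : Qb (n + 1) with
    | true =>
      have hc : (List.range (n + 1)).countP (fun i => Qb (n + 1) != Qb i) = pvCF Qb n := by
        unfold pvCF
        apply List.countP_congr
        intro a _
        simp [h]
      rw [hTT, hc, ih, hCFs, hCTs, h]
      simp [Nat.mul_add]
    | false =>
      have hc : (List.range (n + 1)).countP (fun i => Qb (n + 1) != Qb i) = pvCT Qb n := by
        unfold pvCT
        apply List.countP_congr
        intro a _
        simp [h]
      rw [hTT, hc, ih, hCFs, hCTs, h]
      simp [Nat.add_mul]

theorem parity_add (a b : Int) :
    decide ((a + b) % 2 = 1) = (decide (a % 2 = 1) != decide (b % 2 = 1)) := by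
  by_cases h : a % 2 = 1 <;> by_cases h' : b % 2 = 1 <;> simp [h, h'] <;> omega

theorem pvQ_cons (x : Int) (t : List Int) (k : Nat) :
    pvQ (x :: t) (k + 1) = (decide (x ≤ 0) != pvQ t k) := by
  unfold pvQ
  have h : pvS (x :: t) (k + 1) = pvInd x + pvS t k := by
    simp [pvS, List.take_succ_cons]
  rw [h, parity_add]
  congr 1
  unfold pvInd
  by_cases hx : x > 0 <;> simp [hx] <;> omega

theorem branch_bool (x : Int) (p : Bool) :
    (if x ≤ 0 then !p else p) = (p != decide (x ≤ 0)) := by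
  by_cases h : x ≤ 0 <;> simp [h]

theorem bfold_clean (l : List Int) (c0 c1 : Int) (p : Bool) :
    l.foldl
      (fun (st : Int × Int × Bool) x =>
        if (st.2.2 != decide (x ≤ 0)) then (st.1, st.2.1 + 1, st.2.2 != decide (x ≤ 0))
        else (st.1 + 1, st.2.1, st.2.2 != decide (x ≤ 0))) (c0, c1, p)
    = (c0 + ((List.range l.length).countP (fun k => ((p != pvQ l (k + 1)) = false)) : Int),
       c1 + ((List.range l.length).countP (fun k => ((p != pvQ l (k + 1)) = true)) : Int),
       (p != pvQ l l.length)) := by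
  induction l generalizing c0 c1 p with
  | nil => simp [pvQ, pvS]
  | cons x t ih =>
    simp only [List.foldl_cons, List.length_cons]
    rw [List.range_succ_eq_map]
    simp only [List.countP_cons, List.countP_map]
    have hq1 : pvQ (x :: t) (0 + 1) = decide (x ≤ 0) := by
      rw [pvQ_cons]; simp [pvQ, pvS]
    have hshift : ∀ k : Nat, pvQ (x :: t) (Nat.succ k + 1) = (decide (x ≤ 0) != pvQ t (k + 1)) := by
      intro k; exact pvQ_cons x t (k + 1)
    have hcf : ∀ b : Bool,
        (List.countP ((fun k => decide ((p != pvQ (x :: t) (k + 1)) = b)) ∘ Nat.succ) (List.range t.length))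
        = List.countP (fun k => decide (((p != decide (x ≤ 0)) != pvQ t (k + 1)) = b)) (List.range t.length) := by
      intro b
      apply List.countP_congr
      intro a _
      simp only [Function.comp, hshift a]
      cases p <;> cases hx : decide (x ≤ 0) <;> cases hy : pvQ t (a + 1) <;> simp [hx, hy]
    have hfin : (p != pvQ (x :: t) (t.length + 1)) = ((p != decide (x ≤ 0)) != pvQ t t.length) := by
      rw [pvQ_cons]
      cases p <;> cases hx : decide (x ≤ 0) <;> cases hy : pvQ t t.length <;> simp [hx, hy]
    rw [hfin, hq1, hcf false, hcf true]
    cases hb : (p != decide (x ≤ 0)) with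
    | true =>
      simp only [hb, if_pos]
      rw [ih]
      refine Prod.ext ?_ (Prod.ext ?_ ?_) <;> simp <;> push_cast <;> ring
    | false =>
      simp only [hb, Bool.false_eq_true, if_neg]
      rw [ih]
      refine Prod.ext ?_ (Prod.ext ?_ ?_) <;> simp <;> push_cast <;> ring

def pvMid (arr : List Int) (m : Nat) : List Int :=
  (List.range arr.length).map (fun k => if k < m then pvS arr (k + 1) else 0)

theorem pvMid_getD (arr : List Int) (m k : Nat) :
    (pvMid arr m).getD k 0 = if k < arr.length then (if k < m then pvS arr (k + 1) else 0) else 0 := by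
  unfold pvMid
  by_cases h : k < arr.length
  · rw [List.getD_eq_getElem _ _ (by simpa using h)]
    simp [h]
  · rw [List.getD_eq_default _ _ (by simpa using Nat.le_of_not_lt h)]
    simp [h]

theorem mid_step (arr : List Int) (m : Nat) (h1 : 1 ≤ m) (h2 : m < arr.length) :
    (pvMid arr m).set m
      (PySem.List.pyGetD (pvMid arr m) ((m : Int) - 1) 0 +
        (if PySem.List.pyGetD arr (m : Int) 0 > 0 then 0 else 1))
    = pvMid arr (m + 1) := by
  have hm1 : ((m : Int) - 1) = ((m - 1 : Nat) : Int) := by omega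
  have hget : PySem.List.pyGetD (pvMid arr m) ((m : Int) - 1) 0 = pvS arr m := by
    rw [hm1, PySem.List.pyGetD_natCast, pvMid_getD]
    have : m - 1 < arr.length := by omega
    have h' : m - 1 < m := by omega
    simp only [this, h', if_pos]
    congr 1
    omega
  have harr : PySem.List.pyGetD arr (m : Int) 0 = arr.getD m 0 := by
    rw [PySem.List.pyGetD_natCast]
  have hval : PySem.List.pyGetD (pvMid arr m) ((m : Int) - 1) 0 +
      (if PySem.List.pyGetD arr (m : Int) 0 > 0 then 0 else 1) = pvS arr (m + 1) := by
    rw [hget, harr, pvS_succ arr m h2]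
    rfl
  rw [hval]
  apply List.ext_getElem
  · simp [pvMid]
  · intro j hj hj'
    rw [List.getElem_set]
    unfold pvMid
    simp only [List.getElem_map, List.getElem_range]
    by_cases hjm : m = j
    · subst hjm; simp
    · have : (j < m) = (j < m + 1) := by
        apply propext; constructor <;> intro <;> omega
      simp [hjm, this]

theorem mid_init (arr : List Int) (h : arr ≠ []) :
    (List.replicate arr.length (0 : Int)).set 0
      (if PySem.List.pyGetD arr 0 0 > 0 then 0 else 1) = pvMid arr 1 := by
  have hlen : 0 < arr.length := List.length_pos_iff.mpr h
  have harr : PySem.List.pyGetD arr 0 0 = arr.getD 0 0 := by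
    have : (0 : Int) = ((0 : Nat) : Int) := rfl
    rw [this, PySem.List.pyGetD_natCast]
  have hval : (if PySem.List.pyGetD arr 0 0 > 0 then (0:Int) else 1) = pvS arr 1 := by
    rw [harr, pvS_succ arr 0 hlen, pvS_zero, zero_add]
    rfl
  rw [hval]
  apply List.ext_getElem
  · simp [pvMid]
  · intro j hj hj'
    rw [List.getElem_set]
    unfold pvMid
    simp only [List.getElem_map, List.getElem_range]
    by_cases hj0 : 0 = j
    · subst hj0; simp
    · have : ¬ (j < 1) := by omega
      simp [hj0, this]

theorem mid_fold (arr : List Int) :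
    ∀ (d m : Nat), 1 ≤ m → m + d = arr.length →
    (PySem.List.pyRange (m : Int) (arr.length : Int)).foldl
      (fun L i =>
        L.set i.toNat (PySem.List.pyGetD L (i - 1) 0 +
          (if PySem.List.pyGetD arr i 0 > 0 then 0 else 1)))
      (pvMid arr m)
    = pvMid arr arr.length := by
  intro d
  induction d with
  | zero =>
    intro m h1 h2
    rw [PySem.List.pyRange_one_eq_nil (by omega : (arr.length : Int) ≤ (m : Int))]
    simp only [List.foldl_nil]
    have hm : m = arr.length := by omega
    rw [hm]
  | succ d ih =>
    intro m h1 h2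
    rw [PySem.List.pyRange_one_cons (by push_cast; omega : (m : Int) < (arr.length : Int))]
    rw [List.foldl_cons]
    have htoNat : ((m : Int)).toNat = m := by simp
    have hstep := mid_step arr m h1 (by omega)
    rw [htoNat, hstep]
    have : ((m : Int) + 1) = (((m + 1 : Nat)) : Int) := by push_cast; ring
    rw [this]
    exact ih (m + 1) (by omega) (by omega)

theorem left_spec (arr : List Int) (h : arr ≠ []) :
    f_tlLeft arr = (List.range arr.length).map (fun k => pvS arr (k + 1)) := by
  have hlen : 0 < arr.length := List.length_pos_iff.mpr h
  have e : f_tlLeft arr = (PySem.List.pyRange 1 (arr.length : Int)).foldl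
      (fun L i =>
        L.set i.toNat (PySem.List.pyGetD L (i - 1) 0 +
          (if PySem.List.pyGetD arr i 0 > 0 then 0 else 1)))
      ((List.replicate arr.length (0 : Int)).set 0
        (if PySem.List.pyGetD arr 0 0 > 0 then 0 else 1)) := rfl
  rw [e, mid_init arr h]
  have hf := mid_fold arr (arr.length - 1) 1 (le_refl 1) (by omega)
  rw [Nat.cast_one] at hf
  rw [hf]
  unfold pvMid
  apply List.map_congr_left
  intro a ha
  simp at ha
  simp [ha]

theorem parity_sub (a b : Int) :
    (PySem.Int.mod (a - b) 2 ≠ 0) ↔ ((decide (a % 2 = 1) != decide (b % 2 = 1)) = true) := by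
  rw [PySem.Int.mod_eq_emod_of_pos (by norm_num)]
  by_cases h : a % 2 = 1 <;> by_cases h' : b % 2 = 1 <;> simp [h, h'] <;> omega

theorem pyRange_natCast (n : Nat) :
    ∀ (d a : Nat), n - a = d →
    PySem.List.pyRange (a : Int) (n : Int) = (List.range' a (n - a)).map (Nat.cast : Nat → Int) := by
  intro d
  induction d with
  | zero =>
    intro a h
    rw [PySem.List.pyRange_one_eq_nil (by omega), h]
    simp
  | succ d ih =>
    intro a h
    rw [PySem.List.pyRange_one_cons (by push_cast; omega : (a : Int) < (n : Int)), h, List.range'_succ]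
    have h1 : ((a : Int) + 1) = (((a + 1 : Nat)) : Int) := by push_cast; ring
    rw [h1, ih (a + 1) (by omega)]
    have h2 : n - (a + 1) = d := by omega
    rw [h2]
    simp

-- the port's pair condition, for indices in range, is "prefix parities differ"
theorem cond_spec (arr : List Int) (h : arr ≠ []) (k j : Nat)
    (hk : k < arr.length) (hj : j < arr.length) :
    (PySem.Int.mod
        (PySem.List.pyGetD (f_tlLeft arr) (j : Int) 0 - PySem.List.pyGetD (f_tlLeft arr) (k : Int) 0 +
          (if PySem.List.pyGetD arr (k : Int) 0 > 0 then 0 else 1)) 2 ≠ 0)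
    ↔ ((pvQ arr (j + 1) != pvQ arr k) = true) := by
  have hgl : ∀ m : Nat, m < arr.length →
      PySem.List.pyGetD (f_tlLeft arr) (m : Int) 0 = pvS arr (m + 1) := by
    intro m hm
    rw [left_spec arr h, PySem.List.pyGetD_natCast, PySem.List.getD_map_range _ _ _ _ hm]
  have harr : PySem.List.pyGetD arr (k : Int) 0 = arr.getD k 0 := PySem.List.pyGetD_natCast arr k 0
  rw [hgl j hj, hgl k hk, harr]
  have hE : pvS arr (j + 1) - pvS arr (k + 1) + (if arr.getD k 0 > 0 then (0:Int) else 1)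
      = pvS arr (j + 1) - pvS arr k := by
    rw [pvS_succ arr k hk]
    unfold pvInd
    ring
  rw [hE, parity_sub]
  rfl

theorem inner_spec (arr : List Int) (h : arr ≠ []) (k : Nat) (hk : k < arr.length)
    (q : Int × Int) :
    (PySem.List.pyRange (k : Int) (arr.length : Int)).foldl
      (fun (q : Int × Int) j =>
        if PySem.Int.mod
             (PySem.List.pyGetD (f_tlLeft arr) j 0 - PySem.List.pyGetD (f_tlLeft arr) (k : Int) 0 +
               (if PySem.List.pyGetD arr (k : Int) 0 > 0 then 0 else 1)) 2 ≠ 0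
        then (q.1 + 1, q.2)
        else (q.1, q.2 + 1)) q
    = (q.1 + (pvDD (pvQ arr) k arr.length : Int), q.2 + (pvEE (pvQ arr) k arr.length : Int)) := by
  obtain ⟨qa, qb⟩ := q
  rw [pyRange_natCast arr.length (arr.length - k) k rfl]
  have hcong : ((List.range' k (arr.length - k)).map (Nat.cast : Nat → Int)).foldl
      (fun (q : Int × Int) j =>
        if PySem.Int.mod
             (PySem.List.pyGetD (f_tlLeft arr) j 0 - PySem.List.pyGetD (f_tlLeft arr) (k : Int) 0 +
               (if PySem.List.pyGetD arr (k : Int) 0 > 0 then 0 else 1)) 2 ≠ 0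
        then (q.1 + 1, q.2)
        else (q.1, q.2 + 1)) (qa, qb)
    = (List.range' k (arr.length - k)).foldl
      (fun (q : Int × Int) (j : Nat) =>
        ((fun (a : Int) (j : Nat) => if (pvQ arr (j + 1) != pvQ arr k) = true then a + 1 else a) q.1 j,
         (fun (b : Int) (j : Nat) => if (!(pvQ arr (j + 1) != pvQ arr k)) = true then b + 1 else b) q.2 j)) (qa, qb) := by
    rw [List.foldl_map]
    apply PySem.List.foldl_congr_mem
    intro s j hj
    have hjlt : j < arr.length := by
      rw [List.mem_range'_1] at hj
      omega
    show (if PySem.Int.mod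
             (PySem.List.pyGetD (f_tlLeft arr) ((j : Nat) : Int) 0 - PySem.List.pyGetD (f_tlLeft arr) (k : Int) 0 +
               (if PySem.List.pyGetD arr (k : Int) 0 > 0 then 0 else 1)) 2 ≠ 0
        then (s.1 + 1, s.2)
        else (s.1, s.2 + 1))
      = ((if (pvQ arr (j + 1) != pvQ arr k) = true then s.1 + 1 else s.1),
         (if (!(pvQ arr (j + 1) != pvQ arr k)) = true then s.2 + 1 else s.2))
    by_cases hc : (pvQ arr (j + 1) != pvQ arr k) = true
    · rw [if_pos ((cond_spec arr h k j hk hjlt).mpr hc), if_pos hc, if_neg (by simp [hc])]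
    · rw [if_neg (fun hx => hc ((cond_spec arr h k j hk hjlt).mp hx)), if_neg hc,
        if_pos (by simp at hc; simp [hc])]
  rw [hcong, PySem.List.foldl_prod_mk
      (fun (a : Int) (j : Nat) => if (pvQ arr (j + 1) != pvQ arr k) = true then a + 1 else a)
      (fun (b : Int) (j : Nat) => if (!(pvQ arr (j + 1) != pvQ arr k)) = true then b + 1 else b),
    PySem.List.foldl_count_if, PySem.List.foldl_count_if]
  rfl

theorem outer_spec (arr : List Int) (h : arr ≠ []) :
    (PySem.List.pyRange 0 (arr.length : Int)).foldl
      (fun (p : Int × Int) i =>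
        (PySem.List.pyRange i (arr.length : Int)).foldl
          (fun (q : Int × Int) j =>
            if PySem.Int.mod
                 (PySem.List.pyGetD (f_tlLeft arr) j 0 - PySem.List.pyGetD (f_tlLeft arr) i 0 +
                   (if PySem.List.pyGetD arr i 0 > 0 then 0 else 1)) 2 ≠ 0
            then (q.1 + 1, q.2)
            else (q.1, q.2 + 1)) p)
      ((0 : Int), (0 : Int))
    = ((pvTT (pvQ arr) arr.length : Int),
       (((List.range arr.length).map (fun i => pvEE (pvQ arr) i arr.length)).sum : Int)) := by
  rw [PySem.List.pyRange_zero_natCast]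
  have hcong : ((List.range arr.length).map (fun k => (Nat.cast k : Int))).foldl
      (fun (p : Int × Int) i =>
        (PySem.List.pyRange i (arr.length : Int)).foldl
          (fun (q : Int × Int) j =>
            if PySem.Int.mod
                 (PySem.List.pyGetD (f_tlLeft arr) j 0 - PySem.List.pyGetD (f_tlLeft arr) i 0 +
                   (if PySem.List.pyGetD arr i 0 > 0 then 0 else 1)) 2 ≠ 0
            then (q.1 + 1, q.2)
            else (q.1, q.2 + 1)) p)
      ((0 : Int), (0 : Int))
    = (List.range arr.length).foldl
      (fun (p : Int × Int) (i : Nat) =>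
        ((fun (a : Int) (i : Nat) => a + (pvDD (pvQ arr) i arr.length : Int)) p.1 i,
         (fun (b : Int) (i : Nat) => b + (pvEE (pvQ arr) i arr.length : Int)) p.2 i))
      ((0 : Int), (0 : Int)) := by
    rw [List.foldl_map]
    apply PySem.List.foldl_congr_mem
    intro s i hi
    have hilt : i < arr.length := List.mem_range.mp hi
    exact inner_spec arr h i hilt s
  rw [hcong, PySem.List.foldl_prod_mk
      (fun (a : Int) (i : Nat) => a + (pvDD (pvQ arr) i arr.length : Int))
      (fun (b : Int) (i : Nat) => b + (pvEE (pvQ arr) i arr.length : Int)),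
    PySem.List.foldl_add, PySem.List.foldl_add]
  have hc : ∀ (f : Nat → Nat),
      ((List.range arr.length).map (fun i => ((f i : Nat) : Int))).sum
      = (((List.range arr.length).map f).sum : Int) := by
    intro f
    rw [Nat.cast_list_sum, List.map_map]
    rfl
  rw [hc (fun i => pvDD (pvQ arr) i arr.length), hc (fun i => pvEE (pvQ arr) i arr.length)]
  unfold pvTT
  refine Prod.ext ?_ ?_ <;> simp

theorem final_eq (arr : List Int) (hpre : arr ≠ []) : f_tl arr = f_tl_alt arr := by
  simp only [f_tl, f_tl_alt]
  rw [outer_spec arr hpre]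
  simp only [branch_bool]
  rw [bfold_clean arr 1 0 false]
  simp only [Bool.false_bne]
  -- abbreviations
  have hcf : pvCF (pvQ arr) arr.length
      = 1 + (List.range arr.length).countP (fun k => pvQ arr (k + 1) = false) := by
    unfold pvCF
    rw [List.range_succ_eq_map, List.countP_cons, List.countP_map]
    have : List.countP ((fun k => decide (pvQ arr k = false)) ∘ Nat.succ) (List.range arr.length)
        = List.countP (fun k => decide (pvQ arr (k + 1) = false)) (List.range arr.length) := by
      apply List.countP_congr; intro a _; rfl
    rw [this, pvQ_zero]
    simp [Nat.add_comm]
  have hct : pvCT (pvQ arr) arr.length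
      = (List.range arr.length).countP (fun k => pvQ arr (k + 1) = true) := by
    unfold pvCT
    rw [List.range_succ_eq_map, List.countP_cons, List.countP_map]
    have : List.countP ((fun k => decide (pvQ arr k = true)) ∘ Nat.succ) (List.range arr.length)
        = List.countP (fun k => decide (pvQ arr (k + 1) = true)) (List.range arr.length) := by
      apply List.countP_congr; intro a _; rfl
    rw [this, pvQ_zero]
    simp
  have hG2 := pvGauss arr.length
  have hsum : ((List.range arr.length).map (fun i => pvEE (pvQ arr) i arr.length)).sum
        + pvTT (pvQ arr) arr.length
      = ((List.range arr.length).map (fun i => arr.length - i)).sum := by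
    unfold pvTT
    rw [← List.sum_map_add]
    apply congrArg
    apply List.map_congr_left
    intro a _
    have := pvDD_add_pvEE (pvQ arr) a arr.length
    omega
  have hkey := pvKey (pvQ arr) arr.length
  have hfd : PySem.Int.floordiv ((arr.length : Int) * ((arr.length : Int) + 1)) 2
      = ((((List.range arr.length).map (fun i => arr.length - i)).sum : Nat) : Int) := by
    have h1 : ((arr.length : Int) * ((arr.length : Int) + 1))
        = (((arr.length * (arr.length + 1) : Nat)) : Int) := by push_cast; ring
    rw [h1]
    have h2 : PySem.Int.floordiv (((arr.length * (arr.length + 1) : Nat)) : Int) ((2 : Nat) : Int)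
        = (((arr.length * (arr.length + 1) / 2 : Nat)) : Int) :=
      PySem.Int.floordiv_natCast (arr.length * (arr.length + 1)) 2
    have h3 : ((2 : Nat) : Int) = (2 : Int) := rfl
    rw [h3] at h2
    rw [h2]
    congr 1
    omega
  -- n1 components
  have hn1 : ((pvTT (pvQ arr) arr.length : Nat) : Int)
      = (1 + ((List.range arr.length).countP (fun k => pvQ arr (k + 1) = false) : Int))
        * (0 + ((List.range arr.length).countP (fun k => pvQ arr (k + 1) = true) : Int)) := by
    rw [hkey, hcf, hct]
    push_cast
    ring
  have hn2 : ((((List.range arr.length).map (fun i => pvEE (pvQ arr) i arr.length)).sum : Nat) : Int)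
      = PySem.Int.floordiv ((arr.length : Int) * ((arr.length : Int) + 1)) 2
        - (1 + ((List.range arr.length).countP (fun k => pvQ arr (k + 1) = false) : Int))
          * (0 + ((List.range arr.length).countP (fun k => pvQ arr (k + 1) = true) : Int)) := by
    rw [hfd, ← hn1]
    have hle : pvTT (pvQ arr) arr.length
        ≤ ((List.range arr.length).map (fun i => arr.length - i)).sum := by omega
    omega
  rw [hn1, hn2]

-- ===== VERDICT (by name: the statement is the Claim_ definition above) =====
theorem f_tl_spec : Claim_equal_f_tl := by
  intro arr _ hpre
  unfold Spec_f_tl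
  exact final_eq arr hpre
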